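-- pv_equiv track=rewrite | github.com/Nayan-das08/Codes | ADA/Lab_1-search/linear.py | RecLinearSearch
-- ===== SOURCE A (Python) =====
-- def RecLinearSearch(arr, target, n, count):
-- 	count += 1
-- 	if len(arr) == 0:
-- 		return -1, count
-- 	elif arr[0] ==target:
-- 		return n, count;
-- 	else:
-- 		temp = arr[1:]
-- 		return RecLinearSearch(temp, target, n+1, count)
-- ===== SOURCE B (Python) =====
-- def RecLinearSearch(arr, target, n, count):
--     for i, x in enumerate(arr):
--         count += 1
--         if x == target:
--             return n + i, count
--     return -1, count + 1
-- ===== Notes on version B (the rewrite author's own statement) =====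
-- stated objective: faster
-- what changed: Replaces the tail-slicing recursion (each call copies the rest of the list) with a single iterative enumerate loop that counts comparisons and adds one final count for the empty base-case call.
import Mathlib
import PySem

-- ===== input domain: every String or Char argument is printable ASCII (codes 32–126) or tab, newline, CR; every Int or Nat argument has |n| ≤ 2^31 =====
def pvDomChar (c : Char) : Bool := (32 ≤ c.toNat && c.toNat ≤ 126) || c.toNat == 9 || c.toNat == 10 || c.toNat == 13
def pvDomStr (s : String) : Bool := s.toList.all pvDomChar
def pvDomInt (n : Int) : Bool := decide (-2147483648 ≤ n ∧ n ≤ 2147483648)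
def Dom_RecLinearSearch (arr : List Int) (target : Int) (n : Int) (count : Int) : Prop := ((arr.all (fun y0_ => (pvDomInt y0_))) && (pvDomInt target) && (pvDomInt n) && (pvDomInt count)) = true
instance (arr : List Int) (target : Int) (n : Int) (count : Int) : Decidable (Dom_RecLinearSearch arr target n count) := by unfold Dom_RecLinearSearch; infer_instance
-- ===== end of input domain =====

-- B replaces A's slicing recursion by a single iterative enumerate-style pass (idiomatic; return value only).


-- ===== PORT A =====
-- A: slicing recursion, step for step
def RecLinearSearch (arr : List Int) (target : Int) (n : Int) (count : Int) : List Int :=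
  let count := count + 1
  match arr with
  | [] => [-1, count]
  | x :: temp =>
    if x == target then [n, count]
    else RecLinearSearch temp target (n + 1) count

-- ===== PORT B =====
-- B: iterative enumerate loop (the loop body, with the running index i of enumerate)
def pvAltLoop (arr : List Int) (target : Int) (n : Int) (count : Int) (i : Nat) : List Int :=
  match arr with
  | [] => [-1, count + 1]
  | x :: rest =>
    let count := count + 1
    if x == target then [n + (i : Int), count]
    else pvAltLoop rest target n count (i + 1)

def RecLinearSearch_alt (arr : List Int) (target : Int) (n : Int) (count : Int) : List Int :=
  pvAltLoop arr target n count 0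

-- ===== PRECONDITION & SPEC =====
def Spec_RecLinearSearch (arr : List Int) (target : Int) (n : Int) (count : Int) (out : List Int) : Prop := out = RecLinearSearch_alt arr target n count
instance (arr : List Int) (target : Int) (n : Int) (count : Int) (out : List Int) : Decidable (Spec_RecLinearSearch arr target n count out) := by unfold Spec_RecLinearSearch; infer_instance

-- ===== CLAIM (what is proved, stated in full; the proofs are below) =====
def Claim_equal_RecLinearSearch : Prop := ∀ (arr : List Int) (target : Int) (n : Int) (count : Int), Dom_RecLinearSearch arr target n count → Spec_RecLinearSearch arr target n count (RecLinearSearch arr target n count)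

-- ===== LEMMAS AND PROOFS =====

lemma recLin_eq_loop (arr : List Int) (target : Int) (n : Int) (count : Int) (i : Nat) :
    RecLinearSearch arr target (n + (i : Int)) count = pvAltLoop arr target n count i := by
  induction arr generalizing count i with
  | nil => simp [RecLinearSearch, pvAltLoop]
  | cons x rest ih =>
    simp only [RecLinearSearch, pvAltLoop]
    by_cases h : x == target
    · simp [h]
    · simp only [h]
      have : n + (i : Int) + 1 = n + ((i + 1 : Nat) : Int) := by push_cast; ring
      rw [this, ih]

-- ===== VERDICT (by name: the statement is the Claim_ definition above) =====
theorem RecLinearSearch_spec : Claim_equal_RecLinearSearch := by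
  intro arr target n count _
  unfold Spec_RecLinearSearch RecLinearSearch_alt
  simpa using recLin_eq_loop arr target n count 0
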